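-- pv_equiv track=rewrite | github.com/tgeral68/HyperbolicGraphAndGMM | experiment_script/grid_search.py | rec_parameters
-- ===== SOURCE A (Python) =====
-- def rec_parameters(parameters, keys, index_keys):
--     if(index_keys>=len(parameters)):
--         return ['']
--     c_list = []
--     for ss in rec_parameters(parameters, keys, index_keys+1):
--         for v in parameters[keys[index_keys]]:
--             if(str(v) == ""):
--                 c_list.append(" --"+str(keys[index_keys])+" "+ss)
--             else:
--                 c_list.append(" --"+str(keys[index_keys])+" "+str(v)+ss)
--     return c_list
-- ===== SOURCE B (Python) =====
-- def rec_parameters(parameters, keys, index_keys):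
--     result = ['']
--     for j in range(len(parameters) - 1, index_keys - 1, -1):
--         key = str(keys[j])
--         segs = [" --" + key + " " + str(v) if str(v) != "" else " --" + key + " "
--                 for v in parameters[key]]
--         result = [seg + ss for ss in result for seg in segs]
--     return result
-- ===== Notes on version B (the rewrite author's own statement) =====
-- stated objective: simpler
-- what changed: Replaces A's recursion with an iterative bottom-up product build over the key indices (high to low), precomputing each key's segment strings once per level so the per-value if/else is hoisted out of the suffix loop.
-- outside the precondition, e.g. on rec_parameters({'a': [], 'b': ['x']}, ['missing', 'a'], 0): A returns [], B raises KeyError; on rec_parameters({'a': []}, ['a'], -2): A returns [], B raises IndexError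
import Mathlib
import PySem

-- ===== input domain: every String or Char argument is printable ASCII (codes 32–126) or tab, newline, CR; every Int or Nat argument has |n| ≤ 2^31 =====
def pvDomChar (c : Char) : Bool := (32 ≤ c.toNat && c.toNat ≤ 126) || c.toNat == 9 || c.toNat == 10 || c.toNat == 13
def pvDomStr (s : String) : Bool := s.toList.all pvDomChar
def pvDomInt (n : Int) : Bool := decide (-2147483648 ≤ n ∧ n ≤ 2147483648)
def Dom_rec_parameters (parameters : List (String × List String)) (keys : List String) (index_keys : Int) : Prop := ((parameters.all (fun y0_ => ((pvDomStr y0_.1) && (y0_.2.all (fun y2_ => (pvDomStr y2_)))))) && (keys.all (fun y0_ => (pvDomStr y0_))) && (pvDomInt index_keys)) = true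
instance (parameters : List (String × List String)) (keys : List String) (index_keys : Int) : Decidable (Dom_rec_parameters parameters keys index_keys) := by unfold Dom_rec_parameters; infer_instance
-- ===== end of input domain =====

-- B replaces A's recursion by an iterative bottom-up product build (key indices high→low) with the
-- per-key segment strings precomputed once, hoisting A's per-pair if/else out of the double loop.

-- ===== PORT A =====
-- literal transliteration of Source A; dict lookup = first match on the association list;
-- `none` branches of the lookups are unreachable under Pre_ (Python raises IndexError/KeyError there)
def rec_parameters (parameters : List (String × List String)) (keys : List String) (index_keys : Int) : List String :=
  if (parameters.length : Int) ≤ index_keys then [""]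
  else
    let prev := rec_parameters parameters keys (index_keys + 1)
    prev.foldl (fun c ss =>
      match (PySem.List.pyGet? keys index_keys).bind (fun k => parameters.lookup k) with
      | none => c   -- Python raises here (IndexError/KeyError); outside Pre_
      | some vals =>
        vals.foldl (fun c v =>
          if v = "" then
            c ++ [" --" ++ ((PySem.List.pyGet? keys index_keys).getD "") ++ " " ++ ss]
          else
            c ++ [" --" ++ ((PySem.List.pyGet? keys index_keys).getD "") ++ " " ++ v ++ ss]) c) []
  termination_by (parameters.length - index_keys).toNat
  decreasing_by omega

-- ===== PORT B =====
-- literal transliteration of Source B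
def rec_parameters_alt (parameters : List (String × List String)) (keys : List String) (index_keys : Int) : List String :=
  (PySem.List.pyRange ((parameters.length : Int) - 1) (index_keys - 1) (-1)).foldl
    (fun result j =>
      let key := (PySem.List.pyGet? keys j).getD ""   -- pyGet? none = IndexError, outside Pre_
      let segs := ((parameters.lookup key).getD []).map
        (fun v => if v ≠ "" then " --" ++ key ++ " " ++ v else " --" ++ key ++ " ")
      result.flatMap (fun ss => segs.map (fun seg => seg ++ ss)))
    [""]

-- ===== PRECONDITION & SPEC =====
-- Pre_ excludes inputs on which some level's key index is out of range or its key is missing from the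
-- dict: there Python A raises IndexError/KeyError, except when a deeper level's empty value list makes
-- the running result empty so A skips the faulty lookup and returns [] — a short-circuit accident of
-- A's evaluation order on which B naturally raises.
def Pre_rec_parameters (parameters : List (String × List String)) (keys : List String) (index_keys : Int) : Prop :=
  ((parameters.length : Int) ≤ index_keys ∨ -(keys.length : Int) ≤ index_keys) ∧
  ∀ j ∈ PySem.List.pyRange (max index_keys (-(keys.length : Int))) (parameters.length : Int) 1,
    ((PySem.List.pyGet? keys j).bind (fun k => parameters.lookup k)).isSome = true
instance (parameters : List (String × List String)) (keys : List String) (index_keys : Int) : Decidable (Pre_rec_parameters parameters keys index_keys) := by unfold Pre_rec_parameters; infer_instance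

def pvWitness_rec_parameters : (List (String × List String)) × List String × Int :=
  ([("lr", ["0.1", "0.2"]), ("flag", [""])], ["lr", "flag"], 0)

def Spec_rec_parameters (parameters : List (String × List String)) (keys : List String) (index_keys : Int) (out : List String) : Prop := out = rec_parameters_alt parameters keys index_keys
instance (parameters : List (String × List String)) (keys : List String) (index_keys : Int) (out : List String) : Decidable (Spec_rec_parameters parameters keys index_keys out) := by unfold Spec_rec_parameters; infer_instance

-- ===== CLAIM (what is proved, stated in full; the proofs are below) =====
def Claim_equal_rec_parameters : Prop := ∀ (parameters : List (String × List String)) (keys : List String) (index_keys : Int), Dom_rec_parameters parameters keys index_keys → Pre_rec_parameters parameters keys index_keys → Spec_rec_parameters parameters keys index_keys (rec_parameters parameters keys index_keys)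

-- ===== LEMMAS AND PROOFS =====

theorem pv_witness_ok : Dom_rec_parameters pvWitness_rec_parameters.1 pvWitness_rec_parameters.2.1 pvWitness_rec_parameters.2.2 ∧ Pre_rec_parameters pvWitness_rec_parameters.1 pvWitness_rec_parameters.2.1 pvWitness_rec_parameters.2.2 := by
  decide

-- A's branch-wise append loop is an append of a map of the branch results
theorem foldl_ite_append {α β : Type} (l : List α) (p : α → Prop) [DecidablePred p]
    (f g : α → β) (c : List β) :
    l.foldl (fun c v => if p v then c ++ [f v] else c ++ [g v]) c
      = c ++ l.map (fun v => if p v then f v else g v) := by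
  induction l generalizing c with
  | nil => simp
  | cons x xs ih => by_cases h : p x <;> simp [h, ih]

-- alt at an exhausted index is the base [""]
theorem alt_high (parameters : List (String × List String)) (keys : List String) (i : Int)
    (h : (parameters.length : Int) ≤ i) :
    rec_parameters_alt parameters keys i = [""] := by
  unfold rec_parameters_alt
  rw [PySem.List.pyRange_neg_one_eq_nil (by omega)]
  rfl

-- the per-key segment list B precomputes (proof abbreviation)
def segsAt (parameters : List (String × List String)) (keys : List String) (i : Int) : List String :=
  ((parameters.lookup ((PySem.List.pyGet? keys i).getD "")).getD []).map
    (fun v => if v ≠ "" then " --" ++ ((PySem.List.pyGet? keys i).getD "") ++ " " ++ v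
              else " --" ++ ((PySem.List.pyGet? keys i).getD "") ++ " ")

-- one step of B's loop peels the LAST range element, index i itself
theorem alt_step (parameters : List (String × List String)) (keys : List String) (i : Int)
    (h : i < (parameters.length : Int)) :
    rec_parameters_alt parameters keys i =
      (rec_parameters_alt parameters keys (i + 1)).flatMap
        (fun ss => (segsAt parameters keys i).map (fun seg => seg ++ ss)) := by
  unfold rec_parameters_alt segsAt
  have hsplit : PySem.List.pyRange ((parameters.length : Int) - 1) (i - 1) (-1)
      = PySem.List.pyRange ((parameters.length : Int) - 1) i (-1) ++ [i] := by
    rw [PySem.List.pyRange_neg_one_eq_reverse, PySem.List.pyRange_neg_one_eq_reverse,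
        show i - 1 + 1 = i by ring, PySem.List.pyRange_one_cons (by omega)]
    simp
  rw [hsplit, List.foldl_append, show i + 1 - 1 = i by ring]
  rfl

theorem main_equiv (parameters : List (String × List String)) (keys : List String) :
    ∀ (n : Nat) (i : Int), n = ((parameters.length : Int) - i).toNat →
      Pre_rec_parameters parameters keys i →
      rec_parameters parameters keys i = rec_parameters_alt parameters keys i := by
  intro n
  induction n with
  | zero =>
    intro i hn _
    have h : (parameters.length : Int) ≤ i := by omega
    rw [alt_high parameters keys i h]
    unfold rec_parameters
    simp [h]
  | succ m ih =>
    intro i hn hpre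
    have h : i < (parameters.length : Int) := by omega
    obtain ⟨hlow, hall⟩ := hpre
    have hlow' : -(keys.length : Int) ≤ i := by
      rcases hlow with h1 | h1
      · omega
      · exact h1
    have hmax : max i (-(keys.length : Int)) = i := by omega
    have hi : ((PySem.List.pyGet? keys i).bind (fun k => parameters.lookup k)).isSome = true := by
      apply hall
      rw [hmax, PySem.List.mem_pyRange_one]
      omega
    have hpre' : Pre_rec_parameters parameters keys (i + 1) := by
      refine ⟨by omega, ?_⟩
      intro j hj
      apply hall
      rw [PySem.List.mem_pyRange_one] at hj ⊢
      omega
    have hrec := ih (i + 1) (by omega) hpre'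
    obtain ⟨vals, hvals⟩ := Option.isSome_iff_exists.mp hi
    rw [alt_step parameters keys i h]
    unfold rec_parameters
    rw [if_neg (not_le.mpr h)]
    rw [hrec]
    simp only [hvals]
    have hget : (parameters.lookup ((PySem.List.pyGet? keys i).getD "")).getD [] = vals := by
      cases hk : PySem.List.pyGet? keys i with
      | none => simp [hk] at hvals
      | some k =>
        simp only [hk, Option.bind_some] at hvals
        simp [hvals]
    have hbody : ∀ (c : List String) (ss : String), ss ∈ rec_parameters_alt parameters keys (i + 1) →
        vals.foldl (fun c v =>
            if v = "" then c ++ [" --" ++ ((PySem.List.pyGet? keys i).getD "") ++ " " ++ ss]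
            else c ++ [" --" ++ ((PySem.List.pyGet? keys i).getD "") ++ " " ++ v ++ ss]) c
          = c ++ (segsAt parameters keys i).map (fun seg => seg ++ ss) := by
      intro c ss _
      rw [foldl_ite_append vals (fun v => v = "")]
      unfold segsAt
      rw [hget, List.map_map]
      congr 1
      refine List.map_congr_left ?_
      intro v _
      by_cases hv : v = "" <;> simp [Function.comp, hv, String.append_assoc]
    rw [PySem.List.foldl_congr_mem _ _
      (fun c ss => c ++ (segsAt parameters keys i).map (fun seg => seg ++ ss)) _ hbody]
    rw [PySem.List.foldl_append_eq_flatMap]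
    simp

-- ===== VERDICT (by name: the statement is the Claim_ definition above) =====
theorem rec_parameters_spec : Claim_equal_rec_parameters := by
  intro parameters keys index_keys _ hpre
  unfold Spec_rec_parameters
  exact main_equiv parameters keys _ index_keys rfl hpre
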